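-- pv_equiv track=rewrite | github.com/Luke-Fischer/UoG-Course-Scheduler | flask/clients/data_parser.py | __return_ordered_rooms
-- ===== SOURCE A (Python) =====
-- ROOM_LIST = ["AC", "ALEX", "ANCC", "ANNU", "ARB", "BMED", "CCLC", "CRB", "CRLM", "CRSC", "CSB", "DAIR", "DH", "ECBA",
--     "ESRC", "FEDB", "FS", "FVMI", "GFTC", "GRC", "GRHM", "GTI", "HUTT", "JASAC", "JH", "JTP", "LA", "LENN", "LLC",
--     "MAC", "MACN", "MACS", "MAH", "MASS", "MCKN", "MCLN", "MINS", "OVCM", "PAHL", "REYN", "RICH", "ROZH", "SB",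
--     "SRES", "SSC", "THRN", "UC", "WMEM", "ZAV"]
--
-- def __return_ordered_rooms(parse : str) -> list():
--     tuple_list = list()
--
--     parse = parse.replace(";", "  ")
--     parse = " " + parse + " "
--
--     for room in ROOM_LIST:
--         try:
--             idx = parse.index(" " + room + " ")
--             tuple_list.append((idx, room))
--         except ValueError:
--             continue
--
--     sorted_room_list = sorted(tuple_list, key=lambda tup: tup[0])
--     sorted_rooms = [room_t[1] for room_t in sorted_room_list]
--
--     sorted_nums = []
--
--     parse_split = parse.split()
--     for i, room in enumerate(sorted_rooms):
--         room_idx = parse_split.index(room)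
--
--         room_number = parse_split[room_idx + 1]
--
--         if room_idx < 0 or room_idx >= len(parse_split) - 1:
--             sorted_nums.append(0)
--             continue
--
--         if room_number.upper() == "ROOM":
--             room_number = parse_split[room_idx + 2]
--
--         if room_number.isdigit():
--             sorted_nums.append(int(room_number))
--         else:
--             sorted_nums.append(0)
--
--     return sorted_rooms, sorted_nums
-- ===== SOURCE B (Python) =====
-- ROOM_LIST = ["AC", "ALEX", "ANCC", "ANNU", "ARB", "BMED", "CCLC", "CRB", "CRLM", "CRSC", "CSB", "DAIR", "DH", "ECBA",
--     "ESRC", "FEDB", "FS", "FVMI", "GFTC", "GRC", "GRHM", "GTI", "HUTT", "JASAC", "JH", "JTP", "LA", "LENN", "LLC",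
--     "MAC", "MACN", "MACS", "MAH", "MASS", "MCKN", "MCLN", "MINS", "OVCM", "PAHL", "REYN", "RICH", "ROZH", "SB",
--     "SRES", "SSC", "THRN", "UC", "WMEM", "ZAV"]
--
-- def __return_ordered_rooms(parse: str):
--     # One left-to-right pass over the space-separated chunks of the padded string:
--     # a chunk equal to a room name is exactly a " ROOM "-delimited occurrence, and
--     # chunk order is first-occurrence (substring-index) order, so no sort is needed.
--     p = " " + parse.replace(";", "  ") + " "
--
--     toks = p.split()
--     first = {}                      # token -> index of its first occurrence
--     for i, t in enumerate(toks):
--         if t not in first: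
--             first[t] = i
--
--     room_set = set(ROOM_LIST)
--     rooms = []
--     for w in p.split(" "):
--         if w in room_set and w not in rooms:
--             rooms.append(w)
--
--     nums = []
--     for r in rooms:
--         k = first[r]
--         num = toks[k + 1]
--         if num.upper() == "ROOM":
--             num = toks[k + 2]
--         nums.append(int(num) if num.isdigit() else 0)
--
--     return rooms, nums
-- ===== Notes on version B (the rewrite author's own statement) =====
-- stated objective: faster
-- what changed: A searches the padded string once per room with str.index, sorts the (index, room) pairs, and re-scans parse_split with list.index for every room; B makes one pass over the space-separated chunks (chunk order is first-occurrence order, so no sort) with a seen-check, and one enumerate pass building a first-occurrence token dictionary that replaces all list.index calls.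
import Mathlib
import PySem

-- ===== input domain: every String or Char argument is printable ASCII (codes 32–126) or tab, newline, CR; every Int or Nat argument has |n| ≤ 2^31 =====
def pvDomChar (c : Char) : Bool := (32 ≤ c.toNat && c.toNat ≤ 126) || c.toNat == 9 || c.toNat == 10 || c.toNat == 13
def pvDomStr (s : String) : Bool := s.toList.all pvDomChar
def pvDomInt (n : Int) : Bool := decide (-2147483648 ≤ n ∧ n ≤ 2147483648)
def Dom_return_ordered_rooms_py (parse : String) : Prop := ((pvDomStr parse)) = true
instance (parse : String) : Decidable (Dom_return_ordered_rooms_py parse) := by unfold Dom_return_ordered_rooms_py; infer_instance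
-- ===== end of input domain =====

-- B replaces A's per-room substring search + sort + per-room list.index by one pass over the
-- space-separated chunks (appearance order = substring-index order) and a first-occurrence
-- token dictionary (objective: faster, no sort and no repeated scans).

-- ===== PORT A =====

-- ROOM_LIST, as lists of chars (both ports consult it)
def pvRoomsC : List (List Char) :=
  [
    ['A', 'C'],
    ['A', 'L', 'E', 'X'],
    ['A', 'N', 'C', 'C'],
    ['A', 'N', 'N', 'U'],
    ['A', 'R', 'B'],
    ['B', 'M', 'E', 'D'],
    ['C', 'C', 'L', 'C'],
    ['C', 'R', 'B'],
    ['C', 'R', 'L', 'M'],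
    ['C', 'R', 'S', 'C'],
    ['C', 'S', 'B'],
    ['D', 'A', 'I', 'R'],
    ['D', 'H'],
    ['E', 'C', 'B', 'A'],
    ['E', 'S', 'R', 'C'],
    ['F', 'E', 'D', 'B'],
    ['F', 'S'],
    ['F', 'V', 'M', 'I'],
    ['G', 'F', 'T', 'C'],
    ['G', 'R', 'C'],
    ['G', 'R', 'H', 'M'],
    ['G', 'T', 'I'],
    ['H', 'U', 'T', 'T'],
    ['J', 'A', 'S', 'A', 'C'],
    ['J', 'H'],
    ['J', 'T', 'P'],
    ['L', 'A'],
    ['L', 'E', 'N', 'N'],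
    ['L', 'L', 'C'],
    ['M', 'A', 'C'],
    ['M', 'A', 'C', 'N'],
    ['M', 'A', 'C', 'S'],
    ['M', 'A', 'H'],
    ['M', 'A', 'S', 'S'],
    ['M', 'C', 'K', 'N'],
    ['M', 'C', 'L', 'N'],
    ['M', 'I', 'N', 'S'],
    ['O', 'V', 'C', 'M'],
    ['P', 'A', 'H', 'L'],
    ['R', 'E', 'Y', 'N'],
    ['R', 'I', 'C', 'H'],
    ['R', 'O', 'Z', 'H'],
    ['S', 'B'],
    ['S', 'R', 'E', 'S'],
    ['S', 'S', 'C'],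
    ['T', 'H', 'R', 'N'],
    ['U', 'C'],
    ['W', 'M', 'E', 'M'],
    ['Z', 'A', 'V']]

def return_ordered_rooms_py (parse : String) : List String × List Int :=
  -- parse = parse.replace(";", "  ");  parse = " " + parse + " "   (char-list view of the string)
  let p : List Char := [' '] ++ PySem.Chars.replace parse.toList [';'] [' ', ' '] ++ [' ']
  -- for room in ROOM_LIST: try: idx = parse.index(" "+room+" "); append((idx, room)) except ValueError: continue
  let tupleList : List (Int × List Char) := pvRoomsC.foldl (fun acc room =>
      let idx := PySem.Chars.find p ([' '] ++ room ++ [' '])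
      if idx = -1 then acc else acc ++ [(idx, room)]) []
  let sortedRoomList := PySem.List.sorted tupleList (fun t => t.1) false
  let sortedRooms := sortedRoomList.map (fun t => t.2)
  let parseSplit := PySem.Chars.split₀ p
  let sortedNums : List Int := sortedRooms.foldl (fun acc room =>
      -- room_idx = parse_split.index(room)  (ValueError is unreachable: the room occurred " room "-delimited)
      let roomIdx : Int := (PySem.List.index? parseSplit room).elim 0 (fun k => (k : Int))
      match PySem.List.pyGet? parseSplit (roomIdx + 1) with
      | none => acc ++ [0]      -- Python raises IndexError here; excluded by Pre_
      | some rn =>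
        if roomIdx < 0 ∨ roomIdx ≥ (parseSplit.length : Int) - 1 then acc ++ [0]
        else
          match (if PySem.Chars.upper rn = ['R','O','O','M']
                 then PySem.List.pyGet? parseSplit (roomIdx + 2) else some rn) with
          | none => acc ++ [0]  -- Python raises IndexError here; excluded by Pre_
          | some rn2 =>
            if PySem.Chars.strIsdigit rn2 then acc ++ [(PySem.Int.ofChars? rn2).getD 0]
            else acc ++ [0]) []
  (sortedRooms.map (fun r => String.ofList r), sortedNums)

-- ===== PORT B =====

def return_ordered_rooms_py_alt (parse : String) : List String × List Int :=
  let p : List Char := [' '] ++ PySem.Chars.replace parse.toList [';'] [' ', ' '] ++ [' ']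
  let toks := PySem.Chars.split₀ p
  -- first-occurrence index of every token, one enumerate pass
  let first : PySem.Dict (List Char) Int := (PySem.List.enumerate toks 0).foldl
      (fun d it => if d.contains it.2 then d else d.insert it.2 it.1) PySem.Dict.empty
  let roomSet : PySem.Set (List Char) := PySem.Set.ofList pvRoomsC
  -- one pass over the " "-separated chunks: a chunk equal to a room is a " room "-occurrence
  let rooms : List (List Char) := (PySem.Chars.splitOn p [' ']).foldl
      (fun acc w => if roomSet.contains w && !(acc.contains w) then acc ++ [w] else acc) []
  let nums : List Int := rooms.foldl (fun acc r =>
      let k : Int := first.getD r 0    -- KeyError unreachable: every chunk-room is a token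
      match PySem.List.pyGet? toks (k + 1) with
      | none => acc ++ [0]      -- Python raises IndexError here; excluded by Pre_
      | some num =>
        match (if PySem.Chars.upper num = ['R','O','O','M']
               then PySem.List.pyGet? toks (k + 2) else some num) with
        | none => acc ++ [0]    -- Python raises IndexError here; excluded by Pre_
        | some num2 =>
          acc ++ [if PySem.Chars.strIsdigit num2 then (PySem.Int.ofChars? num2).getD 0 else 0]) []
  (rooms.map (fun r => String.ofList r), nums)

-- ===== PRECONDITION & SPEC =====

-- Pre_ excludes exactly the inputs on which A raises IndexError: some found room's first token
-- occurrence is the last token, or is followed by "ROOM" as the last token.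
def Pre_return_ordered_rooms_py (parse : String) : Prop :=
  let p : List Char := [' '] ++ PySem.Chars.replace parse.toList [';'] [' ', ' '] ++ [' ']
  let toks := PySem.Chars.split₀ p
  ∀ r ∈ pvRoomsC, PySem.Chars.isIn ([' '] ++ r ++ [' ']) p = true →
    toks.contains r = true ∧
    ((PySem.List.index? toks r).getD 0 + 1 < toks.length ∧
     (PySem.Chars.upper (toks.getD ((PySem.List.index? toks r).getD 0 + 1) []) = ['R','O','O','M'] →
       (PySem.List.index? toks r).getD 0 + 2 < toks.length))

instance (parse : String) : Decidable (Pre_return_ordered_rooms_py parse) := by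
  unfold Pre_return_ordered_rooms_py; infer_instance

def pvWitness_return_ordered_rooms_py : String := "AC 101"

def Spec_return_ordered_rooms_py (parse : String) (out : List String × List Int) : Prop := out = return_ordered_rooms_py_alt parse
instance (parse : String) (out : List String × List Int) : Decidable (Spec_return_ordered_rooms_py parse out) := by unfold Spec_return_ordered_rooms_py; infer_instance

-- ===== CLAIM (what is proved, stated in full; the proofs are below) =====
def Claim_equal_return_ordered_rooms_py : Prop := ∀ (parse : String), Dom_return_ordered_rooms_py parse → Pre_return_ordered_rooms_py parse → Spec_return_ordered_rooms_py parse (return_ordered_rooms_py parse)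

-- ===== LEMMAS AND PROOFS =====

-- chunk view of a string: its maximal ' '-free runs (the pieces of s.split(" "))
def pvChunks : List Char → List (List Char)
  | [] => [[]]
  | c :: cs =>
    let r := pvChunks cs
    if c = ' ' then [] :: r else (c :: r.headI) :: r.tail

-- each chunk prefixed by one space
def pvPad (cl : List (List Char)) : List Char := cl.flatMap (fun c => ' ' :: c)

-- start position (in pvPad cl) of the space preceding chunk k
def pvPos (cl : List (List Char)) (k : Nat) : Nat := (pvPad (cl.take k)).length

-- the pattern " r "
def pvPat (r : List Char) : List Char := ' ' :: r ++ [' ']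

theorem pvChunks_ne_nil (s : List Char) : pvChunks s ≠ [] := by
  cases s with
  | nil => simp [pvChunks]
  | cons c cs => simp only [pvChunks]; split <;> simp

theorem pvChunks_sp_free (s : List Char) : ∀ c ∈ pvChunks s, ∀ ch ∈ c, ch ≠ ' ' := by
  induction s with
  | nil => intro c hc; simp [pvChunks] at hc; subst hc; simp
  | cons a cs ih =>
    intro c hc ch hch
    rcases List.ne_nil_iff_exists_cons.mp (pvChunks_ne_nil cs) with ⟨h0, t0, he⟩
    by_cases ha : a = ' '
    · simp only [pvChunks, if_pos ha] at hc
      rcases List.mem_cons.mp hc with rfl | hmem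
      · simp at hch
      · exact ih c hmem ch hch
    · simp only [pvChunks, if_neg ha, he, List.headI, List.tail] at hc
      rcases List.mem_cons.mp hc with rfl | hmem
      · rcases List.mem_cons.mp hch with rfl | hch'
        · exact ha
        · exact ih h0 (he ▸ List.mem_cons_self) ch hch'
      · exact ih c (he ▸ List.mem_cons_of_mem h0 hmem) ch hch

theorem pvChunks_join (s : List Char) :
    (pvChunks s).headI ++ pvPad (pvChunks s).tail = s := by
  induction s with
  | nil => simp [pvChunks, pvPad]
  | cons a cs ih =>
    rcases List.ne_nil_iff_exists_cons.mp (pvChunks_ne_nil cs) with ⟨h0, t0, he⟩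
    rw [he] at ih
    simp only [List.headI, List.tail] at ih
    by_cases ha : a = ' '
    · simp only [pvChunks, if_pos ha, List.headI, List.tail, he, pvPad, List.flatMap_cons]
      simp only [pvPad] at ih
      simp [ha, ih]
    · simp only [pvChunks, if_neg ha, he, List.headI, List.tail]
      simpa using ih

theorem pvChunks_last (m : List Char) :
    (pvChunks (m ++ [' '])).getLast? = some [] ∧ 2 ≤ (pvChunks (m ++ [' '])).length := by
  induction m with
  | nil => simp [pvChunks]
  | cons a m ih =>
    rcases List.ne_nil_iff_exists_cons.mp (pvChunks_ne_nil (m ++ [' '])) with ⟨h0, t0, he⟩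
    rw [he] at ih
    have ht0 : t0 ≠ [] := by
      rcases ih with ⟨-, hlen⟩
      intro h; subst h; simp at hlen
    rcases List.ne_nil_iff_exists_cons.mp ht0 with ⟨h1, t1, he1⟩
    subst he1
    by_cases ha : a = ' '
    · simp only [List.cons_append, pvChunks, if_pos ha, he]
      refine ⟨?_, by simp⟩
      rw [List.getLast?_cons_cons]
      exact ih.1
    · simp only [List.cons_append, pvChunks, if_neg ha, he, List.headI, List.tail]
      refine ⟨?_, by simp⟩
      rw [List.getLast?_cons_cons]
      rw [List.getLast?_cons_cons] at ih
      exact ih.1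

theorem pvSplitOn_go (fuel : Nat) : ∀ (l : List Char), l.length < fuel → ∀ (cur : List Char) (acc : List (List Char)),
    PySem.Chars.splitOn.go [' '] fuel l cur acc
      = acc.reverse ++ ((cur.reverse ++ (pvChunks l).headI) :: (pvChunks l).tail) := by
  induction fuel with
  | zero => intro l hl; omega
  | succ f ih =>
    intro l hl cur acc
    cases l with
    | nil => simp [PySem.Chars.splitOn.go, pvChunks]
    | cons c rest =>
      rcases List.ne_nil_iff_exists_cons.mp (pvChunks_ne_nil rest) with ⟨h0, t0, he⟩
      by_cases hc : c = ' '
      · have hpre : ([' '] : List Char).isPrefixOf (c :: rest) = true := by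
          simp [List.isPrefixOf, hc]
        simp only [PySem.Chars.splitOn.go, hpre, if_pos, List.length_cons, List.length_nil,
          List.length_singleton, List.drop_succ_cons, List.drop_zero]
        rw [ih rest (by simp at hl; omega) [] (cur.reverse :: acc)]
        simp [pvChunks, hc, he]
      · have hpre : ([' '] : List Char).isPrefixOf (c :: rest) = false := by
          simp [List.isPrefixOf]; exact fun h => absurd h.symm hc
        simp only [PySem.Chars.splitOn.go, hpre]
        rw [if_neg (by simp)]
        rw [ih rest (by simp at hl; omega) (c :: cur) acc]
        simp [pvChunks, hc, he]

theorem pvSplitOn_eq (s : List Char) : PySem.Chars.splitOn s [' '] = pvChunks s := by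
  have h := pvSplitOn_go (s.length + 1) s (by omega) [] []
  rcases List.ne_nil_iff_exists_cons.mp (pvChunks_ne_nil s) with ⟨h0, t0, he⟩
  rw [he] at h ⊢
  simpa [PySem.Chars.splitOn] using h

theorem pvPos_succ (cl : List (List Char)) (k : Nat) (hk : k < cl.length) :
    pvPos cl (k + 1) = pvPos cl k + 1 + cl[k].length := by
  have h1 : cl.take (k+1) = cl.take k ++ [cl[k]] := by
    rw [List.take_add_one, List.getElem?_eq_getElem hk]; rfl
  unfold pvPos pvPad
  rw [h1, List.flatMap_append]
  simp
  omega

theorem pvPos_lt (cl : List (List Char)) {k m : Nat} (h : k < m) (hm : m ≤ cl.length) :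
    pvPos cl k < pvPos cl m := by
  induction m with
  | zero => omega
  | succ m ih =>
    have hm' : m < cl.length := by omega
    have hstep := pvPos_succ cl m hm'
    rcases Nat.lt_or_ge k m with hkm | hkm
    · have := ih hkm (by omega); omega
    · have : k = m := by omega
      subst this; omega

theorem pvPos_cons (c : List Char) (cl : List (List Char)) (k : Nat) :
    pvPos (c :: cl) (k + 1) = 1 + c.length + pvPos cl k := by
  unfold pvPos pvPad
  rw [List.take_succ_cons, List.flatMap_cons]
  simp
  omega

theorem pvPos_zero (cl : List (List Char)) : pvPos cl 0 = 0 := rfl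

-- the prefix-surgery core: " r " matching inside c ++ rest where c is space-free
theorem pvPrefix_core (r c rest : List Char) (hr : ∀ ch ∈ r, ch ≠ ' ')
    (hc : ∀ ch ∈ c, ch ≠ ' ') (hrest : rest = [] ∨ rest.head? = some ' ')
    (h : (r ++ [' ']) <+: (c ++ rest)) : r = c ∧ rest ≠ [] := by
  induction r generalizing c with
  | nil =>
    cases c with
    | nil =>
      refine ⟨rfl, ?_⟩
      rintro rfl
      simp at h
    | cons d c' =>
      simp only [List.nil_append, List.cons_append] at h
      rcases List.cons_prefix_cons.mp h with ⟨hd, -⟩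
      exact absurd hd.symm (hc d (by simp))
  | cons a r' ih =>
    cases c with
    | nil =>
      rcases hrest with rfl | hh
      · simp at h
      · cases rest with
        | nil => simp at hh
        | cons e rest' =>
          simp only [List.head?_cons, Option.some.injEq] at hh
          simp only [List.nil_append, List.cons_append] at h
          rcases List.cons_prefix_cons.mp h with ⟨ha, -⟩
          exact absurd (ha.trans hh) (hr a (by simp))
    | cons d c' =>
      simp only [List.cons_append] at h
      rcases List.cons_prefix_cons.mp h with ⟨ha, h'⟩
      have := ih c' (fun ch hch => hr ch (List.mem_cons_of_mem _ hch))
        (fun ch hch => hc ch (List.mem_cons_of_mem _ hch)) h'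
      exact ⟨by rw [ha, this.1], this.2⟩

-- occurrences of " r " in pvPad cl are exactly the chunks equal to r (with a following chunk)
theorem pvOcc (cl : List (List Char)) (hcl : ∀ c ∈ cl, ∀ ch ∈ c, ch ≠ ' ')
    (r : List Char) (hr : r ≠ []) (hrs : ∀ ch ∈ r, ch ≠ ' ') (j : Nat) :
    (pvPat r <+: (pvPad cl).drop j) ↔
      ∃ k, ∃ hk : k < cl.length, cl[k] = r ∧ k + 1 < cl.length ∧ j = pvPos cl k := by
  induction cl generalizing j with
  | nil => simp [pvPad, pvPat]
  | cons c cl' ih =>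
    have hpad : pvPad (c :: cl') = (' ' :: c) ++ pvPad cl' := by simp [pvPad]
    rcases Nat.lt_or_ge j (1 + c.length) with hj | hj
    · constructor
      · intro h
        rcases Nat.eq_zero_or_pos j with rfl | hjpos
        · rw [hpad, List.drop_zero] at h
          have h' : (r ++ [' ']) <+: (c ++ pvPad cl') := by
            have h2 : pvPat r <+: ' ' :: (c ++ pvPad cl') := by simpa using h
            exact (List.cons_prefix_cons.mp h2).2
          have hrest : pvPad cl' = [] ∨ (pvPad cl').head? = some ' ' := by
            cases cl' with
            | nil => left; rfl
            | cons d cl'' => right; simp [pvPad]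
          obtain ⟨rfl, hne⟩ := pvPrefix_core r c _ hrs (hcl c (by simp)) hrest h'
          have hcl' : cl' ≠ [] := by
            intro hh; rw [hh] at hne; exact hne rfl
          refine ⟨0, by simp, rfl, ?_, rfl⟩
          have := List.length_pos_iff.mpr hcl'
          simpa using Nat.succ_lt_succ this
        · obtain ⟨i, rfl⟩ : ∃ i, j = i + 1 := ⟨j - 1, by omega⟩
          rw [hpad] at h
          have hi : i < c.length := by omega
          have hdrop : ((' ' :: c) ++ pvPad cl').drop (i+1) = c.drop i ++ pvPad cl' := by
            have h3 : (' ' :: c) ++ pvPad cl' = ' ' :: (c ++ pvPad cl') := by simp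
            rw [h3, List.drop_succ_cons, List.drop_append_of_le_length (by omega)]
          rw [hdrop] at h
          exfalso
          rcases h with ⟨t, ht⟩
          have hhead := congrArg List.head? ht
          have hcdne : c.drop i ≠ [] := by
            intro hh
            rw [List.drop_eq_nil_iff] at hh
            omega
          rw [List.head?_append_of_ne_nil _ hcdne, List.head?_drop] at hhead
          simp only [pvPat, List.cons_append, List.head?_cons] at hhead
          exact hcl c (by simp) ' ' (List.mem_of_getElem? hhead.symm) rfl
      · rintro ⟨k, hk, hck, hk1, hj'⟩
        have hk0 : k = 0 := by
          by_contra hne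
          obtain ⟨k', rfl⟩ : ∃ k', k = k' + 1 := ⟨k - 1, by omega⟩
          rw [pvPos_cons] at hj'
          omega
        subst hk0
        rw [pvPos_zero] at hj'
        subst hj'
        simp only [List.getElem_cons_zero] at hck
        subst hck
        have hcl' : cl' ≠ [] := by
          simp only [List.length_cons] at hk1
          exact List.length_pos_iff.mp (by omega)
        rcases List.ne_nil_iff_exists_cons.mp hcl' with ⟨d, cl'', rfl⟩
        rw [hpad, List.drop_zero]
        refine ⟨d ++ pvPad cl'', ?_⟩
        simp [pvPat, pvPad]
    · rw [hpad]
      obtain ⟨i, rfl⟩ : ∃ i, j = (1 + c.length) + i := ⟨j - (1 + c.length), by omega⟩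
      have hdrop : ((' '::c) ++ pvPad cl').drop (1 + c.length + i) = (pvPad cl').drop i := by
        have hlen : (' '::c : List Char).length = 1 + c.length := by
          simp only [List.length_cons]; omega
        rw [← hlen, List.drop_length_add_append]
      rw [hdrop, ih (fun x hx => hcl x (List.mem_cons_of_mem _ hx)) i]
      constructor
      · rintro ⟨k, hk, hck, hk1, rfl⟩
        refine ⟨k+1, by simpa using Nat.succ_lt_succ hk, by simpa using hck,
          by simpa using Nat.succ_lt_succ hk1, by rw [pvPos_cons]⟩
      · rintro ⟨k, hk, hck, hk1, hj'⟩
        cases k with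
        | zero =>
          rw [pvPos_zero] at hj'
          omega
        | succ k' =>
          rw [pvPos_cons] at hj'
          refine ⟨k', by simpa using hk, by simpa using hck, by simpa using hk1, by omega⟩

theorem pvLast_ne (cl : List (List Char)) (hlast : cl.getLast? = some []) (r : List Char)
    (hr : r ≠ []) {k : Nat} (hk : k < cl.length) (hck : cl[k] = r) : k + 1 < cl.length := by
  by_contra hge
  have hlen : 0 < cl.length := by omega
  have hkl : k = cl.length - 1 := by omega
  rw [List.getLast?_eq_getElem?,
    List.getElem?_eq_getElem (show cl.length - 1 < cl.length by omega)] at hlast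
  have hnil : cl[cl.length - 1]'(by omega) = [] := by simpa using hlast
  subst hkl
  rw [hck] at hnil
  exact hr hnil

theorem pvIdxOf_le {α : Type} [BEq α] [LawfulBEq α] (l : List α) (a : α) :
    ∀ (k : Nat) (hk : k < l.length), l[k] = a → l.idxOf a ≤ k := by
  induction l with
  | nil => intro k hk; simp at hk
  | cons x l' ih =>
    intro k hk hck
    by_cases hxa : x = a
    · subst hxa; simp [List.idxOf_cons_self]
    · cases k with
      | zero => simp at hck; exact absurd hck hxa
      | succ k' =>
        rw [List.idxOf_cons_ne _ hxa]
        simp only [List.getElem_cons_succ] at hck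
        have := ih k' (by simpa using hk) hck
        omega

theorem pvFind_mem (cl : List (List Char)) (hcl : ∀ c ∈ cl, ∀ ch ∈ c, ch ≠ ' ')
    (hlast : cl.getLast? = some []) (r : List Char) (hr : r ≠ [])
    (hrs : ∀ ch ∈ r, ch ≠ ' ') :
    (0 ≤ PySem.Chars.find (pvPad cl) (pvPat r)) ↔ r ∈ cl := by
  constructor
  · intro h0
    obtain ⟨hpre, -⟩ := PySem.Chars.find_spec h0
    rcases (pvOcc cl hcl r hr hrs _).mp hpre with ⟨k, hk, hck, -, -⟩
    exact hck ▸ List.getElem_mem hk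
  · intro hmem
    have hk : cl.idxOf r < cl.length := List.idxOf_lt_length_of_mem hmem
    have hck : cl[cl.idxOf r] = r := List.getElem_idxOf hk
    have hk1 : cl.idxOf r + 1 < cl.length := pvLast_ne cl hlast r hr hk hck
    have hocc := (pvOcc cl hcl r hr hrs (pvPos cl (cl.idxOf r))).mpr
      ⟨cl.idxOf r, hk, hck, hk1, rfl⟩
    rw [PySem.Chars.find_nonneg_iff]
    exact hocc.isInfix.trans (List.drop_suffix _ _).isInfix

theorem pvFind_val (cl : List (List Char)) (hcl : ∀ c ∈ cl, ∀ ch ∈ c, ch ≠ ' ')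
    (hlast : cl.getLast? = some []) (r : List Char) (hr : r ≠ [])
    (hrs : ∀ ch ∈ r, ch ≠ ' ') (hmem : r ∈ cl) :
    PySem.Chars.find (pvPad cl) (pvPat r) = (pvPos cl (cl.idxOf r) : Int) := by
  have h0 : 0 ≤ PySem.Chars.find (pvPad cl) (pvPat r) :=
    (pvFind_mem cl hcl hlast r hr hrs).mpr hmem
  obtain ⟨hpre, hmin⟩ := PySem.Chars.find_spec h0
  rcases (pvOcc cl hcl r hr hrs _).mp hpre with ⟨k, hk, hck, hk1, hj⟩
  have hidx_le : cl.idxOf r ≤ k := pvIdxOf_le cl r k hk hck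
  have hidx_lt : cl.idxOf r < cl.length := List.idxOf_lt_length_of_mem hmem
  rcases Nat.lt_or_ge (cl.idxOf r) k with hlt | hge
  · exfalso
    have hck0 : cl[cl.idxOf r] = r := List.getElem_idxOf hidx_lt
    have hk10 : cl.idxOf r + 1 < cl.length := pvLast_ne cl hlast r hr hidx_lt hck0
    have hocc0 := (pvOcc cl hcl r hr hrs (pvPos cl (cl.idxOf r))).mpr
      ⟨cl.idxOf r, hidx_lt, hck0, hk10, rfl⟩
    have hplt : pvPos cl (cl.idxOf r) < (PySem.Chars.find (pvPad cl) (pvPat r)).toNat := by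
      rw [hj]
      exact pvPos_lt cl hlt (by omega)
    exact hmin _ hplt hocc0
  · have hkeq : k = cl.idxOf r := by omega
    rw [← Int.toNat_of_nonneg h0, hj, hkeq]

theorem pvFind_lt (cl : List (List Char)) (hcl : ∀ c ∈ cl, ∀ ch ∈ c, ch ≠ ' ')
    (hlast : cl.getLast? = some []) (a b : List Char) (ha : a ≠ []) (hb : b ≠ [])
    (has : ∀ ch ∈ a, ch ≠ ' ') (hbs : ∀ ch ∈ b, ch ≠ ' ')
    (hma : a ∈ cl) (hmb : b ∈ cl) (hidx : cl.idxOf a < cl.idxOf b) :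
    PySem.Chars.find (pvPad cl) (pvPat a) < PySem.Chars.find (pvPad cl) (pvPat b) := by
  rw [pvFind_val cl hcl hlast a ha has hma, pvFind_val cl hcl hlast b hb hbs hmb]
  exact_mod_cast pvPos_lt cl hidx (Nat.le_of_lt (List.idxOf_lt_length_of_mem hmb))

-- the first-occurrence scan: foldl Set.add yields elements pairwise ordered by first index
theorem pvScan_aux {α : Type} [BEq α] [LawfulBEq α] :
    ∀ (L acc : List α), ∃ extra : List α,
      L.foldl PySem.Set.add acc = acc ++ extra ∧
      (∀ e ∈ extra, e ∉ acc ∧ e ∈ L) ∧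
      extra.Pairwise (fun a b => L.idxOf a < L.idxOf b) := by
  intro L
  induction L with
  | nil => intro acc; exact ⟨[], by simp, by simp, by simp⟩
  | cons x L' ih =>
    intro acc
    by_cases hx : x ∈ acc
    · have hadd : PySem.Set.add acc x = acc := by
        simp [PySem.Set.add, hx]
        all_goals exact hx
      obtain ⟨extra, he, hmem, hpw⟩ := ih acc
      refine ⟨extra, ?_, ?_, ?_⟩
      · simpa [hadd] using he
      · intro e hee; exact ⟨(hmem e hee).1, List.mem_cons_of_mem _ (hmem e hee).2⟩
      · refine List.Pairwise.imp_of_mem ?_ hpw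
        intro a b haa hbb hab
        have hane : x ≠ a := fun h => (hmem a haa).1 (h ▸ hx)
        have hbne : x ≠ b := fun h => (hmem b hbb).1 (h ▸ hx)
        rw [List.idxOf_cons_ne _ hane, List.idxOf_cons_ne _ hbne]
        omega
    · have hadd : PySem.Set.add acc x = acc ++ [x] := by
        simp [PySem.Set.add, hx]
        all_goals exact hx
      obtain ⟨extra, he, hmem, hpw⟩ := ih (acc ++ [x])
      refine ⟨x :: extra, ?_, ?_, ?_⟩
      · rw [List.foldl_cons, hadd, he, List.append_assoc]
        rfl
      · intro e hee
        rcases List.mem_cons.mp hee with rfl | hee'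
        · exact ⟨hx, by simp⟩
        · exact ⟨fun hc => (hmem e hee').1 (List.mem_append_left _ hc),
            List.mem_cons_of_mem _ (hmem e hee').2⟩
      · rw [List.pairwise_cons]
        constructor
        · intro e hee
          have hne : x ≠ e := fun h =>
            (hmem e hee).1 (List.mem_append_right _ (h ▸ List.mem_singleton_self x))
          rw [List.idxOf_cons_self, List.idxOf_cons_ne _ hne]
          omega
        · refine List.Pairwise.imp_of_mem ?_ hpw
          intro a b haa hbb hab
          have hane : x ≠ a := fun h =>
            (hmem a haa).1 (List.mem_append_right _ (h ▸ List.mem_singleton_self x))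
          have hbne : x ≠ b := fun h =>
            (hmem b hbb).1 (List.mem_append_right _ (h ▸ List.mem_singleton_self x))
          rw [List.idxOf_cons_ne _ hane, List.idxOf_cons_ne _ hbne]
          omega

theorem pvScan_pairwise {α : Type} [BEq α] [LawfulBEq α] (L : List α) :
    ((PySem.List.dedup L).Pairwise (fun a b => L.idxOf a < L.idxOf b)) := by
  obtain ⟨extra, he, -, hpw⟩ := pvScan_aux L []
  rw [PySem.List.dedup_eq_ofList, PySem.Set.ofList_eq_foldl, he]
  simpa using hpw

-- first-occurrence order survives a value-based filter
theorem pvFilter_idx_lt {α : Type} [BEq α] [LawfulBEq α] (L : List α) (q : α → Bool)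
    (a b : α) (ha : a ∈ L.filter q) (hb : b ∈ L.filter q)
    (h : (L.filter q).idxOf a < (L.filter q).idxOf b) : L.idxOf a < L.idxOf b := by
  induction L with
  | nil => simp at ha
  | cons x L' ih =>
    have hab : a ≠ b := by rintro rfl; omega
    by_cases hq : q x = true
    · rw [List.filter_cons_of_pos hq] at ha hb h
      by_cases hax : a = x
      · subst hax
        rw [List.idxOf_cons_self]
        rw [List.idxOf_cons_ne _ hab]
        omega
      · by_cases hbx : b = x
        · subst hbx
          rw [List.idxOf_cons_ne _ (fun hh => hax hh.symm), List.idxOf_cons_self] at h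
          omega
        · rw [List.idxOf_cons_ne _ (fun hh => hax hh.symm),
            List.idxOf_cons_ne _ (fun hh => hbx hh.symm)] at h
          have ha' : a ∈ L'.filter q := by
            rcases List.mem_cons.mp ha with rfl | h'
            · exact absurd rfl hax
            · exact h'
          have hb' : b ∈ L'.filter q := by
            rcases List.mem_cons.mp hb with rfl | h'
            · exact absurd rfl hbx
            · exact h'
          have := ih ha' hb' (by omega)
          rw [List.idxOf_cons_ne _ (fun hh => hax hh.symm),
            List.idxOf_cons_ne _ (fun hh => hbx hh.symm)]
          omega
    · rw [List.filter_cons_of_neg (by simpa using hq)] at ha hb h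
      have hax : x ≠ a := by
        rintro rfl
        exact hq (List.of_mem_filter ha)
      have hbx : x ≠ b := by
        rintro rfl
        exact hq (List.of_mem_filter hb)
      rw [List.idxOf_cons_ne _ hax, List.idxOf_cons_ne _ hbx]
      have := ih ha hb h
      omega

-- the first-occurrence dictionary of B agrees with list.index
theorem pvDictFirst (toks : List (List Char)) (v : List Char) : ∀ (s : Int) (d : PySem.Dict (List Char) Int),
    ((PySem.List.enumerate toks s).foldl
        (fun d it => if d.contains it.2 then d else d.insert it.2 it.1) d).get? v
      = ((d.get? v).or ((PySem.List.index? toks v).map (fun k => s + (k : Int)))) := by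
  induction toks with
  | nil =>
    intro s d
    simp [PySem.List.enumerate_nil, PySem.List.index?_eq_idxOf?]
  | cons t ts ih =>
    intro s d
    rw [PySem.List.enumerate_cons, List.foldl_cons]
    by_cases hv : t = v
    · subst hv
      rw [PySem.List.index?_cons_self]
      by_cases hc : d.contains t = true
      · rw [if_pos hc, ih]
        obtain ⟨w, hw⟩ : ∃ w, d.get? t = some w := by
          rw [PySem.Dict.contains_eq_isSome_get?] at hc
          exact Option.isSome_iff_exists.mp hc
        simp [hw]
      · rw [if_neg hc, ih]
        have hnone : d.get? t = none := by
          rw [PySem.Dict.contains_eq_isSome_get?] at hc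
          simpa using hc
        simp [hnone, PySem.Dict.get?_insert_self]
    · have hstep : (if d.contains t = true then d else d.insert t s).get? v = d.get? v := by
        split
        · rfl
        · exact PySem.Dict.get?_insert_of_ne d s (fun hh => hv hh.symm)
      rw [ih, hstep, PySem.List.index?_cons_of_ne _ hv]
      cases hidx : PySem.List.index? ts v with
      | none => simp [hidx]
      | some k =>
        cases hd : d.get? v with
        | some w => simp [hd]
        | none =>
          simp [hd]
          push_cast
          ring


-- ROOM_LIST facts
set_option maxRecDepth 8192 in
theorem pvRooms_nodup : pvRoomsC.Nodup := by decide

set_option maxRecDepth 8192 in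
theorem pvRooms_ok_bool : pvRoomsC.all (fun r => !r.isEmpty && r.all (fun ch => !(ch == ' '))) = true := by decide

theorem pvRooms_ok : ∀ r ∈ pvRoomsC, r ≠ [] ∧ ∀ ch ∈ r, ch ≠ ' ' := by
  intro r hr
  have h := List.all_eq_true.mp pvRooms_ok_bool r hr
  rw [Bool.and_eq_true] at h
  refine ⟨?_, ?_⟩
  · intro hnil
    rw [hnil] at h
    simp at h
  · intro ch hch
    have h2 := List.all_eq_true.mp h.2 ch hch
    simpa using h2

set_option maxRecDepth 8192 in
theorem pvNilNotRoom : ([] : List Char) ∉ pvRoomsC := by decide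

theorem pvSetContains (L : List (List Char)) (x : List Char) :
    ((PySem.Set.ofList L).contains x = true) ↔ x ∈ L := by
  have h1 : (PySem.Set.ofList L).contains x = List.contains (PySem.Set.ofList L) x := rfl
  rw [h1, List.contains_iff_mem, PySem.Set.mem_ofList]

-- B's chunk scan is dedup-after-filter
theorem pvScanB_eq (chs : List (List Char)) (q : List Char → Bool) :
    chs.foldl (fun acc w => if q w && !(acc.contains w) then acc ++ [w] else acc) []
      = PySem.List.dedup (chs.filter q) := by
  have hstep : (fun (acc : List (List Char)) w => if q w && !(acc.contains w) then acc ++ [w] else acc)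
      = fun (acc : List (List Char)) w => if q w then PySem.Set.add acc w else acc := by
    funext acc w
    by_cases h1 : q w
    · by_cases h2 : acc.contains w
      · simp [h1, h2, PySem.Set.add]
      · simp [h1, h2, PySem.Set.add]
    · simp [h1]
  rw [hstep, PySem.List.foldl_if_eq_foldl_filter, PySem.List.dedup_eq_ofList,
    PySem.Set.ofList_eq_foldl]

-- members of B's room list are rooms that occur " room "-delimited
theorem pvRoomsMem (p m : List Char) (hp : p = ' ' :: (m ++ [' '])) (r : List Char)
    (hr : r ∈ (PySem.Chars.splitOn p [' ']).foldl
      (fun acc w => if (PySem.Set.ofList pvRoomsC).contains w && !(acc.contains w)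
        then acc ++ [w] else acc) []) :
    r ∈ pvRoomsC ∧ PySem.Chars.isIn ([' '] ++ r ++ [' ']) p = true := by
  have hchp : pvChunks p = [] :: pvChunks (m ++ [' ']) := by rw [hp]; simp [pvChunks]
  have hpad : p = pvPad (pvChunks (m ++ [' '])) := by
    have hj := pvChunks_join p
    rw [hchp] at hj
    simpa using hj.symm
  rw [pvSplitOn_eq, hchp, pvScanB_eq, List.filter_cons_of_neg (by simp [pvNilNotRoom]),
    PySem.List.mem_dedup, List.mem_filter] at hr
  obtain ⟨hcl, hq⟩ := hr
  have hroom : r ∈ pvRoomsC := (pvSetContains _ _).mp hq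
  obtain ⟨hne, hsp⟩ := pvRooms_ok r hroom
  refine ⟨hroom, ?_⟩
  have hfind := (pvFind_mem (pvChunks (m ++ [' '])) (pvChunks_sp_free _)
    (pvChunks_last m).1 r hne hsp).mpr hcl
  rw [PySem.Chars.isIn_iff_infix]
  have := (PySem.Chars.find_nonneg_iff (pvPad (pvChunks (m ++ [' ']))) (pvPat r)).mp hfind
  rw [hpad]
  exact this

-- A's sorted room list equals B's scan
theorem pvRoomsAgree (p m : List Char) (hp : p = ' ' :: (m ++ [' '])) :
    (PySem.List.sorted
        (pvRoomsC.foldl (fun acc room =>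
          if PySem.Chars.find p ([' '] ++ room ++ [' ']) = -1 then acc
          else acc ++ [(PySem.Chars.find p ([' '] ++ room ++ [' ']), room)]) [])
        (fun t => t.1) false).map (fun t => t.2)
      = (PySem.Chars.splitOn p [' ']).foldl
          (fun acc w => if (PySem.Set.ofList pvRoomsC).contains w && !(acc.contains w)
            then acc ++ [w] else acc) [] := by
  have hchp : pvChunks p = [] :: pvChunks (m ++ [' ']) := by rw [hp]; simp [pvChunks]
  have hpad : p = pvPad (pvChunks (m ++ [' '])) := by
    have hj := pvChunks_join p
    rw [hchp] at hj
    simpa using hj.symm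
  have hlast := (pvChunks_last m).1
  have hsp := pvChunks_sp_free (m ++ [' '])
  rw [pvSplitOn_eq, hchp, pvScanB_eq, List.filter_cons_of_neg (by simp [pvNilNotRoom])]
  rw [PySem.List.foldl_congr_mem pvRoomsC _
      (fun acc room => if ¬ (PySem.Chars.find p ([' '] ++ room ++ [' ']) = -1)
        then acc ++ [(PySem.Chars.find p ([' '] ++ room ++ [' ']), room)] else acc) []
      (fun acc x _ => (ite_not _ _ _).symm),
    PySem.List.foldl_append_ite
      (fun room => ¬ (PySem.Chars.find p ([' '] ++ room ++ [' ']) = -1))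
      (fun room => (PySem.Chars.find p ([' '] ++ room ++ [' ']), room)),
    List.nil_append]
  have hpat : ∀ r : List Char, ([' '] ++ r ++ [' ']) = pvPat r := fun r => rfl
  have hfind_iff : ∀ r ∈ pvRoomsC,
      ((¬ (PySem.Chars.find p ([' '] ++ r ++ [' ']) = -1)) ↔ r ∈ pvChunks (m ++ [' '])) := by
    intro r hrm
    obtain ⟨hrne, hrsp⟩ := pvRooms_ok r hrm
    rw [hpat, hpad]
    have hge := PySem.Chars.neg_one_le_find (pvPad (pvChunks (m ++ [' ']))) (pvPat r)
    constructor
    · intro hne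
      exact (pvFind_mem _ hsp hlast r hrne hrsp).mp (by omega)
    · intro hmem
      have := (pvFind_mem _ hsp hlast r hrne hrsp).mpr hmem
      omega
  have hmemR : ∀ x, x ∈ PySem.List.dedup ((pvChunks (m ++ [' '])).filter
      (fun w => (PySem.Set.ofList pvRoomsC).contains w)) ↔
      (x ∈ pvChunks (m ++ [' ']) ∧ x ∈ pvRoomsC) := by
    intro x
    rw [PySem.List.mem_dedup, List.mem_filter, pvSetContains]
  have hmemF : ∀ x, x ∈ pvRoomsC.filter
      (fun r => decide (¬ (PySem.Chars.find p ([' '] ++ r ++ [' ']) = -1))) ↔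
      (x ∈ pvRoomsC ∧ x ∈ pvChunks (m ++ [' '])) := by
    intro x
    rw [List.mem_filter]
    constructor
    · rintro ⟨h1, h2⟩
      exact ⟨h1, (hfind_iff x h1).mp (by simpa using h2)⟩
    · rintro ⟨h1, h2⟩
      exact ⟨h1, by simpa using (hfind_iff x h1).mpr h2⟩
  have hperm : (PySem.List.dedup ((pvChunks (m ++ [' '])).filter
      (fun w => (PySem.Set.ofList pvRoomsC).contains w))).Perm
      (pvRoomsC.filter (fun r => decide (¬ (PySem.Chars.find p ([' '] ++ r ++ [' ']) = -1)))) := by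
    rw [List.perm_ext_iff_of_nodup (PySem.List.nodup_dedup _) (pvRooms_nodup.filter _)]
    intro x
    rw [hmemR, hmemF]
    tauto
  have hpw : (PySem.List.dedup ((pvChunks (m ++ [' '])).filter
      (fun w => (PySem.Set.ofList pvRoomsC).contains w))).Pairwise
      (fun a b => PySem.Chars.find p ([' '] ++ a ++ [' ']) < PySem.Chars.find p ([' '] ++ b ++ [' '])) := by
    refine List.Pairwise.imp_of_mem ?_ (pvScan_pairwise _)
    intro a b ha hb hab
    obtain ⟨hacl, haR⟩ := (hmemR a).mp ha
    obtain ⟨hbcl, hbR⟩ := (hmemR b).mp hb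
    obtain ⟨hane, hasp⟩ := pvRooms_ok a haR
    obtain ⟨hbne, hbsp⟩ := pvRooms_ok b hbR
    have haf : a ∈ (pvChunks (m ++ [' '])).filter (fun w => (PySem.Set.ofList pvRoomsC).contains w) := by
      rw [List.mem_filter]
      exact ⟨hacl, (pvSetContains _ _).mpr haR⟩
    have hbf : b ∈ (pvChunks (m ++ [' '])).filter (fun w => (PySem.Set.ofList pvRoomsC).contains w) := by
      rw [List.mem_filter]
      exact ⟨hbcl, (pvSetContains _ _).mpr hbR⟩
    have hidx := pvFilter_idx_lt (pvChunks (m ++ [' '])) _ a b haf hbf hab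
    rw [hpat, hpat, hpad]
    exact pvFind_lt _ hsp hlast a b hane hbne hasp hbsp hacl hbcl hidx
  have hsorted := PySem.List.sorted_eq_of_perm_of_pairwise_lt
      ((pvRoomsC.filter (fun r => decide (¬ (PySem.Chars.find p ([' '] ++ r ++ [' ']) = -1)))).map
        (fun r => (PySem.Chars.find p ([' '] ++ r ++ [' ']), r)))
      ((PySem.List.dedup ((pvChunks (m ++ [' '])).filter
        (fun w => (PySem.Set.ofList pvRoomsC).contains w))).map
        (fun r => (PySem.Chars.find p ([' '] ++ r ++ [' ']), r)))
      (fun t => t.1)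
      (hperm.map _)
      (by
        rw [List.pairwise_map]
        exact hpw)
  rw [hsorted, List.map_map]
  have hid : ((fun t : Int × List Char => t.2) ∘ fun r => (PySem.Chars.find p ([' '] ++ r ++ [' ']), r)) = id := rfl
  rw [hid, List.map_id]

-- the two number-loop bodies agree on every room B collects
theorem pvStep_eq (toks : List (List Char)) (r : List Char) (hcont : toks.contains r = true)
    (hb1 : (PySem.List.index? toks r).getD 0 + 1 < toks.length)
    (hb2 : PySem.Chars.upper (toks.getD ((PySem.List.index? toks r).getD 0 + 1) []) = ['R','O','O','M'] →
      (PySem.List.index? toks r).getD 0 + 2 < toks.length)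
    (acc : List Int) :
    (match PySem.List.pyGet? toks ((PySem.List.index? toks r).elim 0 (fun k => (k : Int)) + 1) with
     | none => acc ++ [0]
     | some rn =>
       if (PySem.List.index? toks r).elim 0 (fun k => (k : Int)) < 0 ∨
          (PySem.List.index? toks r).elim 0 (fun k => (k : Int)) ≥ (toks.length : Int) - 1
       then acc ++ [0]
       else
         match (if PySem.Chars.upper rn = ['R','O','O','M']
                then PySem.List.pyGet? toks ((PySem.List.index? toks r).elim 0 (fun k => (k : Int)) + 2)
                else some rn) with
         | none => acc ++ [0]
         | some rn2 =>
           if PySem.Chars.strIsdigit rn2 then acc ++ [(PySem.Int.ofChars? rn2).getD 0]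
           else acc ++ [0])
    = (match PySem.List.pyGet? toks
          (((PySem.List.enumerate toks 0).foldl
            (fun d it => if d.contains it.2 then d else d.insert it.2 it.1)
            PySem.Dict.empty).getD r 0 + 1) with
       | none => acc ++ [0]
       | some num =>
         match (if PySem.Chars.upper num = ['R','O','O','M']
                then PySem.List.pyGet? toks
                  (((PySem.List.enumerate toks 0).foldl
                    (fun d it => if d.contains it.2 then d else d.insert it.2 it.1)
                    PySem.Dict.empty).getD r 0 + 2)
                else some num) with
         | none => acc ++ [0]
         | some num2 =>
           acc ++ [if PySem.Chars.strIsdigit num2 then (PySem.Int.ofChars? num2).getD 0 else 0]) := by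
  have hmem : r ∈ toks := List.contains_iff_mem.mp hcont
  obtain ⟨k, hk⟩ := Option.isSome_iff_exists.mp ((PySem.List.index?_isSome_iff toks r).mpr hmem)
  have hA : (PySem.List.index? toks r).elim 0 (fun k => (k : Int)) = (k : Int) := by
    rw [hk]; rfl
  have hB : ((PySem.List.enumerate toks 0).foldl
      (fun d it => if d.contains it.2 then d else d.insert it.2 it.1)
      PySem.Dict.empty).getD r 0 = (k : Int) := by
    rw [PySem.Dict.getD_eq_get?_getD, pvDictFirst toks r 0 PySem.Dict.empty, hk]
    simp
  rw [hk] at hb1 hb2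
  simp only [Option.getD_some] at hb1 hb2
  rw [List.getD_eq_getElem?_getD, List.getElem?_eq_getElem hb1, Option.getD_some] at hb2
  have hc1 : ((k : Int) + 1) = ((k + 1 : Nat) : Int) := by push_cast; ring
  have hc2 : ((k : Int) + 2) = ((k + 2 : Nat) : Int) := by push_cast; ring
  rw [hA, hB, hc1, hc2, PySem.List.pyGet?_natCast, PySem.List.pyGet?_natCast,
    List.getElem?_eq_getElem hb1]
  have hiff : ¬ ((k : Int) < 0 ∨ (k : Int) ≥ (toks.length : Int) - 1) := by
    push_cast
    omega
  simp only [hiff, if_false]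
  by_cases hroom : PySem.Chars.upper (toks[k + 1]'hb1) = ['R','O','O','M']
  · have hk2 : k + 2 < toks.length := hb2 hroom
    rw [List.getElem?_eq_getElem hk2]
    simp only [hroom, if_true, if_pos]
    by_cases hdig : PySem.Chars.strIsdigit (toks[k + 2]'hk2) = true
    · simp [hdig]
    · simp [hdig]
  · simp only [hroom, if_false]
    by_cases hdig : PySem.Chars.strIsdigit (toks[k + 1]'hb1) = true
    · simp [hdig]
    · simp [hdig]

-- ===== VERDICT (by name: the statement is the Claim_ definition above) =====
theorem return_ordered_rooms_py_spec : Claim_equal_return_ordered_rooms_py := by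
  intro parse hdom hpre
  show return_ordered_rooms_py parse = return_ordered_rooms_py_alt parse
  simp only [Pre_return_ordered_rooms_py] at hpre
  simp only [return_ordered_rooms_py, return_ordered_rooms_py_alt]
  rw [pvRoomsAgree ([' '] ++ PySem.Chars.replace parse.toList [';'] [' ', ' '] ++ [' '])
      (PySem.Chars.replace parse.toList [';'] [' ', ' ']) rfl]
  refine congrArg (Prod.mk _) ?_
  refine PySem.List.foldl_congr_mem _ _ _ _ ?_
  intro acc r hr
  obtain ⟨hroom, hisin⟩ := pvRoomsMem ([' '] ++ PySem.Chars.replace parse.toList [';'] [' ', ' '] ++ [' '])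
      (PySem.Chars.replace parse.toList [';'] [' ', ' ']) rfl r hr
  obtain ⟨hcont, hb1, hb2⟩ := hpre r hroom hisin
  exact pvStep_eq _ r hcont hb1 hb2 acc
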